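-- pv_equiv track=rewrite | github.com/YashSaxena21/METEORA | Experiments/CP Task/RankRAG_Baseline.py | find_spanning_chunks
-- ===== SOURCE A (Python) =====
-- from typing import List, Dict, Set, Any, Union, Optional, Tuple
--
-- def find_spanning_chunks(span_text: Optional[str], span_start: Optional[int],
--                         span_end: Optional[int], chunks: List[Dict]) -> List[int]:
--     """
--     Find all chunks that contain any part of the span text based on character positions.
--     """
--     if span_text is None or span_start is None or span_end is None:
--         return []
--
--     # Find all chunks that overlap with the span
--     spanning_chunks = [
--         i for i, chunk in enumerate(chunks)
--         if chunk["start_pos"] <= span_end and chunk["end_pos"] >= span_start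
--     ]
--
--     # Ensure we have a consecutive range of chunks
--     if spanning_chunks:
--         min_chunk = min(spanning_chunks)
--         max_chunk = max(spanning_chunks)
--         spanning_chunks = list(range(min_chunk, max_chunk + 1))
--
--     return spanning_chunks
-- ===== SOURCE B (Python) =====
-- from typing import List, Dict, Optional
--
-- def find_spanning_chunks(span_text: Optional[str], span_start: Optional[int],
--                          span_end: Optional[int], chunks: List[Dict]) -> List[int]:
--     if span_text is None or span_start is None or span_end is None:
--         return []
--
--     def overlaps(chunk):
--         return chunk["start_pos"] <= span_end and chunk["end_pos"] >= span_start
--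
--     n = len(chunks)
--     lo = 0
--     while lo < n and not overlaps(chunks[lo]):
--         lo += 1
--     if lo == n:
--         return []
--     hi = n - 1
--     while not overlaps(chunks[hi]):
--         hi -= 1
--     return list(range(lo, hi + 1))
-- ===== Notes on version B (the rewrite author's own statement) =====
-- stated objective: alternative
-- what changed: Instead of building the full list of overlapping indices and taking min/max of it, B scans forward for the first overlapping chunk and backward for the last one and returns range(lo, hi+1) directly, never materialising the intermediate index list.
import Mathlib
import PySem

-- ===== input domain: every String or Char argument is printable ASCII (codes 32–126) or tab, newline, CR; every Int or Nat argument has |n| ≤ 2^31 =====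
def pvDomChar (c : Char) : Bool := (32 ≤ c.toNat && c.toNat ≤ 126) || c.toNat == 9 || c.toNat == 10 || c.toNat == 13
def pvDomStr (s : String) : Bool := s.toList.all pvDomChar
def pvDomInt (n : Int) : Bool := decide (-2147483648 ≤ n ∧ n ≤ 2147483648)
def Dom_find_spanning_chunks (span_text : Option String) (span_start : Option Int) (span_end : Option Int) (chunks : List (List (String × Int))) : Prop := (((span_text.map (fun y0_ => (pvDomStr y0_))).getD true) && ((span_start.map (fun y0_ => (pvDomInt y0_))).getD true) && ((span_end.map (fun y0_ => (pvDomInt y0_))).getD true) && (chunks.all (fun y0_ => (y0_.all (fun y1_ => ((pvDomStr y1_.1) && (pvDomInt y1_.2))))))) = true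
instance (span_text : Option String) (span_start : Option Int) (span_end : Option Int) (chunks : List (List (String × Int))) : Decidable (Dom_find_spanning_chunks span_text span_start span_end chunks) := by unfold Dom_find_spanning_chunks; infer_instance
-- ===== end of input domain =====

-- B replaces A's "collect all overlapping indices then min/max" with two boundary scans
-- (first and last overlapping chunk) and returns the range directly: an alternative decomposition.

-- ===== PORT A =====
-- Python dict access chunk[k] on an association list (first match); the default 0 is never
-- reached inside Pre_, which requires the accessed keys to exist
def pvGetKey (c : List (String × Int)) (k : String) : Int :=
  ((c.find? (fun kv => kv.1 == k)).map (·.2)).getD 0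

def find_spanning_chunks (span_text : Option String) (span_start : Option Int) (span_end : Option Int) (chunks : List (List (String × Int))) : List Int :=
  match span_text, span_start, span_end with
  | some _, some s, some e =>
      let spanning : List Int :=
        ((PySem.List.enumerate chunks 0).filter
          (fun q => decide (pvGetKey q.2 "start_pos" ≤ e) && decide (s ≤ pvGetKey q.2 "end_pos"))).map (·.1)
      if spanning = [] then spanning
      else
        match PySem.List.min? spanning (fun x => x), PySem.List.max? spanning (fun x => x) with
        | some mn, some mx => PySem.List.pyRange mn (mx + 1) 1
        | _, _ => []
  | _, _, _ => []

-- ===== PORT B =====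
-- B's own copy of the dict access (same Python primitive; ports do not share definitions)
def pvGetKeyB (c : List (String × Int)) (k : String) : Int :=
  match c.find? (fun kv => kv.1 == k) with
  | some kv => kv.2
  | none => 0

def pvOverlapB (s e : Int) (c : List (String × Int)) : Bool :=
  decide (pvGetKeyB c "start_pos" ≤ e) && decide (s ≤ pvGetKeyB c "end_pos")

-- forward scan: index of the first chunk satisfying p
def pvFirstIdx (p : List (String × Int) → Bool) : List (List (String × Int)) → Option Nat
  | [] => none
  | c :: rest => if p c then some 0 else (pvFirstIdx p rest).map (· + 1)

-- backward scan: index of the last chunk satisfying p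
def pvLastIdx (p : List (String × Int) → Bool) : List (List (String × Int)) → Option Nat
  | [] => none
  | c :: rest =>
      match pvLastIdx p rest with
      | some j => some (j + 1)
      | none => if p c then some 0 else none

def find_spanning_chunks_alt (span_text : Option String) (span_start : Option Int) (span_end : Option Int) (chunks : List (List (String × Int))) : List Int :=
  match span_text with
  | none => []
  | some _ =>
    match span_start with
    | none => []
    | some s =>
      match span_end with
      | none => []
      | some e =>
        match pvFirstIdx (pvOverlapB s e) chunks with
        | none => []
        | some lo =>
            match pvLastIdx (pvOverlapB s e) chunks with
            | none => []
            | some hi => PySem.List.pyRange (lo : Int) ((hi : Int) + 1) 1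

-- ===== PRECONDITION & SPEC =====
-- Pre_ excludes exactly the inputs where Python A raises KeyError: when all three span values
-- are present, every chunk must have a "start_pos" key, and an "end_pos" key whenever the
-- short-circuit 'and' reaches it (start_pos <= span_end).
def Pre_find_spanning_chunks (span_text : Option String) (span_start : Option Int) (span_end : Option Int) (chunks : List (List (String × Int))) : Prop :=
  span_text.isSome = true → span_start.isSome = true → ∀ e ∈ span_end, ∀ c ∈ chunks,
    (c.any (fun kv => kv.1 == "start_pos")) = true ∧
    ((((c.find? (fun kv => kv.1 == "start_pos")).map (·.2)).getD 0) ≤ e →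
      (c.any (fun kv => kv.1 == "end_pos")) = true)
instance (span_text : Option String) (span_start : Option Int) (span_end : Option Int) (chunks : List (List (String × Int))) : Decidable (Pre_find_spanning_chunks span_text span_start span_end chunks) := by unfold Pre_find_spanning_chunks; infer_instance

def pvWitness_find_spanning_chunks : Option String × Option Int × Option Int × (List (List (String × Int))) :=
  (some "abc", some 0, some 10, [[("start_pos", 0), ("end_pos", 4)], [("start_pos", 5), ("end_pos", 9)]])

def Spec_find_spanning_chunks (span_text : Option String) (span_start : Option Int) (span_end : Option Int) (chunks : List (List (String × Int))) (out : List Int) : Prop := out = find_spanning_chunks_alt span_text span_start span_end chunks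
instance (span_text : Option String) (span_start : Option Int) (span_end : Option Int) (chunks : List (List (String × Int))) (out : List Int) : Decidable (Spec_find_spanning_chunks span_text span_start span_end chunks out) := by unfold Spec_find_spanning_chunks; infer_instance

-- ===== CLAIM =====
def Claim_equal_find_spanning_chunks : Prop := ∀ (span_text : Option String) (span_start : Option Int) (span_end : Option Int) (chunks : List (List (String × Int))), Dom_find_spanning_chunks span_text span_start span_end chunks → Pre_find_spanning_chunks span_text span_start span_end chunks → Spec_find_spanning_chunks span_text span_start span_end chunks (find_spanning_chunks span_text span_start span_end chunks)

-- ===== LEMMAS AND PROOFS =====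

-- A's comprehension, with the enumerate start generalized
def pvIdxs (p : List (String × Int) → Bool) (s : Int) (chunks : List (List (String × Int))) : List Int :=
  ((PySem.List.enumerate chunks s).filter (fun q => p q.2)).map (·.1)

theorem pvIdxs_nil (p : List (String × Int) → Bool) (s : Int) : pvIdxs p s [] = [] := rfl

theorem pvIdxs_cons (p : List (String × Int) → Bool) (s : Int) (c : List (String × Int)) (rest : List (List (String × Int))) :
    pvIdxs p s (c :: rest) = if p c then s :: pvIdxs p (s + 1) rest else pvIdxs p (s + 1) rest := by
  simp only [pvIdxs, PySem.List.enumerate_cons, List.filter_cons]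
  by_cases h : p c <;> simp [h]

theorem pvIdxs_lb (p : List (String × Int) → Bool) (chunks : List (List (String × Int))) :
    ∀ (s x : Int), x ∈ pvIdxs p s chunks → s ≤ x := by
  induction chunks with
  | nil => intro s x h; simp [pvIdxs_nil] at h
  | cons c rest ih =>
      intro s x h
      rw [pvIdxs_cons] at h
      split at h
      · rcases List.mem_cons.mp h with h | h
        · omega
        · have := ih (s + 1) x h; omega
      · have := ih (s + 1) x h; omega

theorem foldl_min_of_le (t : List Int) : ∀ (a : Int), (∀ y ∈ t, a ≤ y) → t.foldl min a = a := by
  induction t with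
  | nil => intro a _; rfl
  | cons y t ih =>
      intro a h
      have hy : a ≤ y := h y (List.mem_cons_self)
      simp only [List.foldl_cons, min_eq_left hy]
      exact ih a (fun z hz => h z (List.mem_cons_of_mem _ hz))

theorem pvIdxs_min (p : List (String × Int) → Bool) (chunks : List (List (String × Int))) :
    ∀ (s : Int), PySem.List.min? (pvIdxs p s chunks) (fun x => x) = Option.map (fun k : Nat => s + (k : Int)) (pvFirstIdx p chunks) := by
  induction chunks with
  | nil => intro s; simp [pvIdxs_nil, pvFirstIdx, PySem.List.min?_eq_none_iff]
  | cons c rest ih =>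
      intro s
      rw [pvIdxs_cons]
      by_cases hp : p c
      · simp only [hp, if_pos, pvFirstIdx, PySem.List.min?_id_cons]
        have : (pvIdxs p (s + 1) rest).foldl min s = s :=
          foldl_min_of_le _ s (fun y hy => by have := pvIdxs_lb p rest (s + 1) y hy; omega)
        simp [this]
      · simp only [hp, if_neg, pvFirstIdx, ih (s + 1), Bool.false_eq_true, not_false_eq_true]
        cases pvFirstIdx p rest with
        | none => simp
        | some k => simp; ring

theorem pvIdxs_max (p : List (String × Int) → Bool) (chunks : List (List (String × Int))) :
    ∀ (s : Int), PySem.List.max? (pvIdxs p s chunks) (fun x => x) = Option.map (fun k : Nat => s + (k : Int)) (pvLastIdx p chunks) := by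
  induction chunks with
  | nil => intro s; simp [pvIdxs_nil, pvLastIdx, PySem.List.max?_eq_none_iff]
  | cons c rest ih =>
      intro s
      rw [pvIdxs_cons]
      by_cases hp : p c
      · simp only [hp, if_pos]
        cases hL : pvIdxs p (s + 1) rest with
        | nil =>
            have hn : (PySem.List.max? ([] : List Int) (fun x => x)) = none :=
              (PySem.List.max?_eq_none_iff _ _).mpr rfl
            have hIH := ih (s + 1)
            rw [hL, hn] at hIH
            have h0 : pvLastIdx p rest = none := by
              cases h : pvLastIdx p rest with
              | none => rfl
              | some k => rw [h] at hIH; simp at hIH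
            rw [PySem.List.max?_id_cons]
            simp [pvLastIdx, h0, hp]
        | cons y t =>
            have hy : s ≤ y := by
              have := pvIdxs_lb p rest (s + 1) y (by rw [hL]; exact List.mem_cons_self)
              omega
            have hIH := ih (s + 1)
            rw [hL, PySem.List.max?_id_cons] at hIH
            cases hlast : pvLastIdx p rest with
            | none => rw [hlast] at hIH; simp at hIH
            | some j =>
                rw [hlast] at hIH
                simp only [Option.map_some, Option.some.injEq] at hIH
                rw [PySem.List.max?_id_cons]
                simp only [List.foldl_cons, max_eq_right hy]
                simp only [pvLastIdx, hlast, Option.map_some]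
                rw [show List.foldl max y t = s + 1 + (j : Int) from hIH]
                congr 1
                push_cast
                ring
      · simp only [hp, if_neg, Bool.false_eq_true, not_false_eq_true]
        rw [ih (s + 1)]
        cases hlast : pvLastIdx p rest with
        | none => simp [pvLastIdx, hlast, hp]
        | some j => simp [pvLastIdx, hlast]; ring

-- ===== VERDICT =====
theorem find_spanning_chunks_spec : Claim_equal_find_spanning_chunks := by
  intro st ss se chunks _ _
  unfold Spec_find_spanning_chunks find_spanning_chunks find_spanning_chunks_alt
  match st, ss, se with
  | none, _, _ => rfl
  | some _, none, _ => rfl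
  | some _, some _, none => rfl
  | some _, some s, some e =>
      have hsp : ((PySem.List.enumerate chunks (0 : Int)).filter
          (fun q => decide (pvGetKey q.2 "start_pos" ≤ e) && decide (s ≤ pvGetKey q.2 "end_pos"))).map (·.1)
          = pvIdxs (pvOverlapB s e) 0 chunks := by
        have hk : ∀ c k, pvGetKeyB c k = pvGetKey c k := by
          intro c k
          unfold pvGetKey pvGetKeyB
          cases c.find? (fun kv => kv.1 == k) <;> simp
        simp [pvIdxs, pvOverlapB, hk]
      show (let spanning := _; if spanning = [] then spanning else _) = _
      rw [hsp]
      have hmin := pvIdxs_min (pvOverlapB s e) chunks 0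
      have hmax := pvIdxs_max (pvOverlapB s e) chunks 0
      cases hf : pvFirstIdx (pvOverlapB s e) chunks with
      | none =>
          rw [hf] at hmin
          simp only [Option.map_none] at hmin
          have h0 : pvIdxs (pvOverlapB s e) 0 chunks = [] := (PySem.List.min?_eq_none_iff _ _).mp hmin
          simp [h0, hf]
      | some lo =>
          rw [hf] at hmin
          have hne : pvIdxs (pvOverlapB s e) 0 chunks ≠ [] := by
            intro h
            rw [(PySem.List.min?_eq_none_iff _ _).mpr h] at hmin
            simp at hmin
          rw [if_neg hne, hmin]
          cases hl : pvLastIdx (pvOverlapB s e) chunks with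
          | none =>
              rw [hl] at hmax
              simp only [Option.map_none] at hmax
              rw [hmax]
              simp [hf, hl]
          | some hi =>
              rw [hl] at hmax
              rw [hmax]
              simp [hf, hl]
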